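-- pv_equiv track=rewrite | github.com/Farctated/Python | google_foobar/The Cake is Not a Lie/solution.py | solution
-- ===== SOURCE A (Python) =====
-- def solution(s):
--     # cut slices into parts
--     # check the length is not odd
--     # make sure no remainder is left
--     # create an array/list of equal slices
--     # return the number of item in the list/slices
--
--     l = len(s)
--     for i in range(1,l):
--         if l % i == 0:
--             equal_parts = [s[j:j+i] for j in range(0,l,i)]
--             if equal_parts[1:] == equal_parts[:-1]:
--                 return len(equal_parts)
--     return 1
-- ===== SOURCE B (Python) =====
-- def solution(s):
--     # Idiomatic rotation trick: the smallest p >= 1 at which s occurs in s+s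
--     # is the smallest block length whose repetition forms s, so the answer
--     # is len(s) // p (p == len(s) when s is not a repetition).
--     n = len(s)
--     if n == 0:
--         return 1
--     return n // (s + s).find(s, 1)
-- ===== Notes on version B (the rewrite author's own statement) =====
-- stated objective: idiomatic
-- what changed: A trial-divides the length, slicing the string into parts for each candidate part length and comparing the shifted part lists; B replaces the whole search by the classic rotation one-liner len(s) // (s + s).find(s, 1), whose result is the smallest repeating-block length.
import Mathlib
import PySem

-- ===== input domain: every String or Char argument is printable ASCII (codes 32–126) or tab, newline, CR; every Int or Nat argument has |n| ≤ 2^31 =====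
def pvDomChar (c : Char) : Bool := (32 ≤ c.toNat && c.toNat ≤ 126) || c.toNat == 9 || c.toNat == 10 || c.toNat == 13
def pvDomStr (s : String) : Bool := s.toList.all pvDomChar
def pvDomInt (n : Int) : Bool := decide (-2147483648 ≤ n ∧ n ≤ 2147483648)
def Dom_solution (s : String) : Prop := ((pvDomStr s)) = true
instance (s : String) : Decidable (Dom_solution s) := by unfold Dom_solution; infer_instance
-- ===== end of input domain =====

-- B replaces A's trial division over part lengths by the idiomatic rotation trick
-- (answer = len(s) // (s+s).find(s, 1)); objective: idiomatic (and measurably faster: one C-level substring search replaces the Python-level divisor loop).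

-- ===== PORT A =====
-- the for-loop with its early 'return' (returns 1 when the range is exhausted)
def solutionGo (cs : List Char) (l : Int) : List Int → Int
  | [] => 1
  | i :: rest =>
      if PySem.Int.mod l i = 0 then
        let equal_parts := (PySem.List.pyRange 0 l i).map
          (fun j => PySem.List.slice cs (some j) (some (j + i)))
        if PySem.List.slice equal_parts (some 1) none
             = PySem.List.slice equal_parts none (some (-1)) then
          (equal_parts.length : Int)
        else solutionGo cs l rest
      else solutionGo cs l rest

def solution (s : String) : Int :=
  let cs := s.toList
  let l : Int := PySem.Chars.len cs
  solutionGo cs l (PySem.List.pyRange 1 l)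

-- ===== PORT B =====
def solution_alt (s : String) : Int :=
  let cs := s.toList
  let n : Int := PySem.Chars.len cs
  if n = 0 then 1
  else PySem.Int.floordiv n (PySem.Chars.findFrom (cs ++ cs) cs 1)

-- ===== PRECONDITION & SPEC =====
def Spec_solution (s : String) (out : Int) : Prop := out = solution_alt s
instance (s : String) (out : Int) : Decidable (Spec_solution s out) := by unfold Spec_solution; infer_instance

-- ===== CLAIM (what is proved, stated in full; the proofs are below) =====
def Claim_equal_solution : Prop := ∀ (s : String), Dom_solution s → Spec_solution s (solution s)

-- ===== LEMMAS AND PROOFS =====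

-- "shifting cyclically by j fixes cs": the cyclic-period predicate
def cycP (cs : List Char) (j : Nat) : Prop :=
  ∀ k < cs.length, cs[(k + j) % cs.length]? = cs[k]?

-- "shifting by i fixes cs where defined": the (acyclic) period predicate
def shiftP (cs : List Char) (i : Nat) : Prop :=
  ∀ k, k + i < cs.length → cs[k + i]? = cs[k]?

lemma cycP_zero (cs : List Char) : cycP cs 0 := by
  intro k hk; simp [Nat.mod_eq_of_lt hk]

lemma cycP_mod (cs : List Char) (j : Nat) (_hn : 0 < cs.length) :
    cycP cs (j % cs.length) ↔ cycP cs j := by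
  unfold cycP
  constructor <;> intro h k hk <;>
    simpa [Nat.add_mod, Nat.mod_mod_of_dvd] using h k hk
  

lemma cycP_add (cs : List Char) (a b : Nat) (ha : cycP cs a) (hb : cycP cs b) :
    cycP cs (a + b) := by
  intro k hk
  have h1 := ha k hk
  have h2 := hb ((k + a) % cs.length) (Nat.mod_lt _ (by omega))
  rw [h1] at h2
  rw [← h2]
  congr 1
  conv_rhs => rw [Nat.add_mod, Nat.mod_mod_of_dvd _ (dvd_refl _)]
  rw [← Nat.add_mod, Nat.add_assoc]

lemma cycP_length (cs : List Char) : cycP cs cs.length := by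
  intro k hk
  rw [Nat.add_mod_right, Nat.mod_eq_of_lt hk]

lemma cycP_mul (cs : List Char) (a q : Nat) (ha : cycP cs a) : cycP cs (q * a) := by
  induction q with
  | zero => simpa using cycP_zero cs
  | succ q ih => have := cycP_add cs (q * a) a ih ha; simpa [Nat.succ_mul] using this

lemma cycP_inv (cs : List Char) (a : Nat) (ha : cycP cs a) (h : a ≤ cs.length) :
    cycP cs (cs.length - a) := by
  intro k hk
  have h2 := ha ((k + (cs.length - a)) % cs.length) (Nat.mod_lt _ (by omega))
  rw [← h2]
  congr 1
  conv_lhs => rw [Nat.add_mod, Nat.mod_mod_of_dvd _ (dvd_refl _)]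
  rw [← Nat.add_mod]
  have : k + (cs.length - a) + a = k + cs.length := by omega
  rw [this, Nat.add_mod_right, Nat.mod_eq_of_lt hk]

-- minimal positive cyclic period divides every cyclic period
lemma cycP_min_dvd (cs : List Char) (f : Nat) (hf1 : 1 ≤ f) (hfn : f ≤ cs.length)
    (hn : 0 < cs.length)
    (hf : cycP cs f) (hmin : ∀ i, 1 ≤ i → i < f → ¬ cycP cs i)
    (j : Nat) (hj : cycP cs j) : f ∣ j := by
  set n := cs.length with hnn
  set q := j / f with hq
  set r := j % f with hr
  have hqr : f * q + r = j := Nat.div_add_mod j f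
  have hrf : r < f := Nat.mod_lt _ (by omega)
  have h1 : cycP cs (q * (n - f)) := cycP_mul cs (n - f) q (cycP_inv cs f hf hfn)
  have h2 : cycP cs (j + q * (n - f)) := cycP_add cs j _ hj h1
  have h3 : j + q * (n - f) = r + q * n := by
    have h5 : q * (n - f) = q * n - q * f := Nat.mul_sub q n f
    have hle : q * f ≤ q * n := Nat.mul_le_mul_left q hfn
    have hfj : f * q ≤ j := by omega
    have hcm : f * q = q * f := Nat.mul_comm f q
    omega
  rw [h3] at h2
  have h4 : cycP cs r := by
    have := (cycP_mod cs (r + q * n) hn).2 h2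
    rwa [Nat.add_mul_mod_self_right, Nat.mod_eq_of_lt (by omega)] at this
  rcases Nat.eq_zero_or_pos r with h0 | h0
  · exact Nat.dvd_of_mod_eq_zero h0
  · exact absurd h4 (hmin r h0 hrf)

lemma shiftP_of_cycP (cs : List Char) (i : Nat) (h : cycP cs i) : shiftP cs i := by
  intro k hk
  have := h k (by omega)
  rwa [Nat.mod_eq_of_lt hk] at this

lemma get_mod_of_shiftP (cs : List Char) (i : Nat) (hi : 1 ≤ i) (h : shiftP cs i) :
    ∀ k < cs.length, cs[k]? = cs[k % i]? := by
  intro k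
  induction k using Nat.strong_induction_on with
  | _ k ih =>
    intro hk
    by_cases hki : k < i
    · rw [Nat.mod_eq_of_lt hki]
    · have hki' : i ≤ k := Nat.le_of_not_lt hki
      have h1 : (k - i) + i < cs.length := by omega
      have h2 := h (k - i) h1
      have h3 : k - i + i = k := by omega
      rw [h3] at h2
      rw [h2, ih (k - i) (by omega) (by omega), Nat.mod_eq_sub_mod hki']

lemma cycP_of_shiftP (cs : List Char) (i : Nat) (hi : 1 ≤ i) (hd : i ∣ cs.length)
    (h : shiftP cs i) : cycP cs i := by
  intro k hk
  have hn : 0 < cs.length := by omega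
  have hg := get_mod_of_shiftP cs i hi h
  rw [hg k hk, hg ((k + i) % cs.length) (Nat.mod_lt _ hn)]
  congr 1
  rw [Nat.mod_mod_of_dvd _ hd, Nat.add_mod_right]

-- rotation characterisation of an occurrence of cs inside cs ++ cs
lemma prefix_drop_iff_rot (cs : List Char) (j : Nat) (hj : j ≤ cs.length) :
    cs <+: (cs ++ cs).drop j ↔ cs.drop j ++ cs.take j = cs := by
  rw [List.drop_append_of_le_length hj, List.prefix_iff_eq_take, List.take_append]
  have h1 : List.take cs.length (cs.drop j) = cs.drop j :=
    List.take_of_length_le (by simp)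
  have h2 : cs.length - (cs.drop j).length = j := by simp; omega
  rw [h1, h2]
  exact ⟨fun h => h.symm, fun h => h.symm⟩

lemma rot_iff_cycP (cs : List Char) (j : Nat) (hj : j ≤ cs.length) :
    cs.drop j ++ cs.take j = cs ↔ cycP cs j := by
  have key : ∀ k < cs.length, (cs.drop j ++ cs.take j)[k]? = cs[(k + j) % cs.length]? := by
    intro k hk
    by_cases hkj : k < cs.length - j
    · rw [List.getElem?_append_left (by simp; omega), List.getElem?_drop]
      congr 1
      rw [Nat.mod_eq_of_lt (by omega)]
      omega
    · rw [List.getElem?_append_right (by simp; omega), List.getElem?_take]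
      rw [if_pos (by simp; omega)]
      congr 1
      simp only [List.length_drop]
      have : (k + j) % cs.length = k + j - cs.length := by
        rw [Nat.mod_eq_sub_mod (by omega), Nat.mod_eq_of_lt (by omega)]
      omega
  constructor
  · intro h k hk
    conv_rhs => rw [← h]
    exact (key k hk).symm
  · intro h
    apply List.ext_getElem?
    intro k
    by_cases hk : k < cs.length
    · rw [key k hk, h k hk]
    · rw [List.getElem?_eq_none (by simp; omega), List.getElem?_eq_none (by omega)]

-- adjacent-equality reading of xs.tail = xs.dropLast
lemma tail_eq_dropLast_iff {α : Type} (xs : List α) :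
    xs.tail = xs.dropLast ↔ ∀ j, j + 1 < xs.length → xs[j + 1]? = xs[j]? := by
  constructor
  · intro h j hj
    have := congrArg (fun l => l[j]?) h
    simpa [List.getElem?_tail, List.getElem?_dropLast, if_pos (by omega : j < xs.length - 1)]
      using this
  · intro h
    apply List.ext_getElem?
    intro j
    rw [List.getElem?_tail, List.getElem?_dropLast]
    by_cases hj : j < xs.length - 1
    · rw [if_pos hj]
      exact h j (by omega)
    · rw [if_neg hj, List.getElem?_eq_none (by omega)]

-- the equal_parts list, simplified
lemma parts_eq (cs : List Char) (i : Nat) (hi : 1 ≤ i) (hd : i ∣ cs.length) :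
    ((PySem.List.pyRange 0 (cs.length : Int) (i : Int)).map
        (fun j => PySem.List.slice cs (some j) (some (j + (i : Int)))))
      = (List.range (cs.length / i)).map (fun k => (cs.drop (i * k)).take i) := by
  rw [PySem.List.pyRange_of_pos _ _ (by exact_mod_cast hi)]
  have hcount : (if (0:Int) < (cs.length : Int) then
      (((cs.length : Int) - 0 + (i : Int) - 1) / (i : Int)).toNat else 0) = cs.length / i := by
    by_cases hn : 0 < cs.length
    · rw [if_pos (by exact_mod_cast hn)]
      have h1 : ((cs.length : Int) - 0 + (i : Int) - 1) = ((cs.length + i - 1 : Nat) : Int) := by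
        omega
      rw [h1, ← Int.natCast_div, Int.toNat_natCast]
      obtain ⟨m, hm⟩ := hd
      rw [hm, Nat.mul_div_cancel_left m (by omega)]
      have h6 : i * m + i - 1 = i * m + (i - 1) := by omega
      rw [h6, Nat.mul_add_div (by omega : 0 < i), Nat.div_eq_of_lt (by omega)]
      omega
    · rw [if_neg (by exact_mod_cast hn), Nat.eq_zero_of_not_pos hn]
      simp
  rw [hcount, List.map_map]
  apply List.map_congr_left
  intro k _
  show PySem.List.slice cs (some (0 + (i:Int) * (k:Int))) (some (0 + (i:Int) * (k:Int) + (i:Int)))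
      = (cs.drop (i * k)).take i
  have h2 : (0 : Int) + (i : Int) * (k : Int) = ((i * k : Nat) : Int) := by push_cast; ring
  rw [h2]
  exact PySem.List.slice_natCast_add cs (i * k) i

-- A's slice-list comparison is exactly shiftP
lemma parts_cond_iff (cs : List Char) (i : Nat) (hi : 1 ≤ i) (hd : i ∣ cs.length) :
    ((List.range (cs.length / i)).map (fun k => (cs.drop (i * k)).take i)).tail
      = ((List.range (cs.length / i)).map (fun k => (cs.drop (i * k)).take i)).dropLast
    ↔ shiftP cs i := by
  set n := cs.length with hn
  set m := n / i with hm
  have hmn : i * m = n := Nat.mul_div_cancel' hd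
  rw [tail_eq_dropLast_iff]
  have hlen : ((List.range m).map (fun k => (cs.drop (i * k)).take i)).length = m := by simp
  have helem : ∀ j < m, ((List.range m).map (fun k => (cs.drop (i * k)).take i))[j]?
      = some ((cs.drop (i * j)).take i) := by
    intro j hj
    rw [List.getElem?_map, List.getElem?_range hj, Option.map_some]
  constructor
  · intro h k hk
    set j := k / i with hj
    set r := k % i with hr
    have hri : r < i := Nat.mod_lt _ (by omega)
    have hk2 : i * j + r = k := by rw [hj, hr]; exact Nat.div_add_mod k i
    have hj1 : j + 1 < m := by
      by_contra hc
      have : m ≤ j + 1 := by omega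
      have : i * m ≤ i * (j + 1) := Nat.mul_le_mul_left i this
      have : n ≤ i * j + i := by rw [← hmn] at *; omega
      omega
    have heq := h j (by rw [hlen]; omega)
    rw [helem j (by omega), helem (j+1) (by omega)] at heq
    have heq2 : (cs.drop (i * (j+1))).take i = (cs.drop (i * j)).take i :=
      Option.some.inj heq
    have hget := congrArg (fun l => l[r]?) heq2
    simp only [List.getElem?_take, if_pos hri, List.getElem?_drop] at hget
    have e1 : i * (j + 1) + r = k + i := by rw [Nat.mul_add]; omega
    have e2 : i * j + r = k := hk2
    rw [e1, e2] at hget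
    exact hget
  · intro h j hjlen
    rw [hlen] at hjlen
    rw [helem j (by omega), helem (j+1) hjlen]
    congr 1
    apply List.ext_getElem?
    intro r
    by_cases hri : r < i
    · simp only [List.getElem?_take, if_pos hri, List.getElem?_drop]
      have hkn : i * j + r + i < n := by
        have h1 : j + 2 ≤ m := by omega
        have : i * (j + 2) ≤ i * m := Nat.mul_le_mul_left i h1
        rw [hmn] at this
        have : i * j + i + i ≤ n := by rw [Nat.mul_add] at this; omega
        omega
      have := h (i * j + r) hkn
      have e1 : i * (j + 1) + r = i * j + r + i := by rw [Nat.mul_add]; omega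
      rw [e1]
      exact this
    · simp only [List.getElem?_take, if_neg hri]

-- B's find result: it is the least positive cyclic period of cs
lemma find_facts (cs : List Char) (hn : 0 < cs.length) :
    ∃ fN : Nat, PySem.Chars.findFrom (cs ++ cs) cs 1 = (fN : Int) ∧ 1 ≤ fN ∧
      fN ≤ cs.length ∧ cycP cs fN ∧ (∀ i, 1 ≤ i → i < fN → ¬ cycP cs i) := by
  have hk1 : (1 : Nat) ≤ (cs ++ cs).length := by simp; omega
  have heq1 : (((1 : Nat)) : Int) = (1 : Int) := Nat.cast_one
  have hocc_n : cs <+: (cs ++ cs).drop cs.length := by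
    rw [List.drop_left]
  have hne : PySem.Chars.findFrom (cs ++ cs) cs (((1 : Nat)) : Int) ≠ -1 := by
    rw [Ne, PySem.Chars.findFrom_natCast_eq_neg_one_iff (cs ++ cs) cs 1 hk1]
    rw [not_not, List.drop_append_of_le_length (by omega)]
    exact (List.suffix_append _ _).isInfix
  obtain ⟨h1le, hpre, hmin⟩ := PySem.Chars.findFrom_natCast_spec (cs ++ cs) cs 1 hk1 hne
  set F := PySem.Chars.findFrom (cs ++ cs) cs (((1 : Nat)) : Int) with hF
  have h1le' : (1 : Int) ≤ F := by exact_mod_cast h1le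
  have hfn : F.toNat ≤ cs.length := by
    by_contra hc
    exact hmin cs.length (by omega) (by omega) hocc_n
  refine ⟨F.toNat, ?_, by omega, hfn, ?_, ?_⟩
  · rw [← heq1, ← hF, Int.toNat_of_nonneg (by omega)]
  · exact (rot_iff_cycP cs F.toNat hfn).1 ((prefix_drop_iff_rot cs F.toNat hfn).1 hpre)
  · intro i hi1 hiF hcyc
    have hin : i ≤ cs.length := by omega
    exact hmin i hi1 hiF
      ((prefix_drop_iff_rot cs i hin).2 ((rot_iff_cycP cs i hin).2 hcyc))

-- A's loop computed, given the minimal cyclic period fN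
lemma loop_eq (cs : List Char) (fN : Nat) (hn : 0 < cs.length)
    (hf1 : 1 ≤ fN) (hfn : fN ≤ cs.length) (hf : cycP cs fN)
    (hmin : ∀ i, 1 ≤ i → i < fN → ¬ cycP cs i)
    (i₀ : Nat) (h1 : 1 ≤ i₀) (h2 : i₀ ≤ fN) :
    solutionGo cs (cs.length : Int) (PySem.List.pyRange (i₀ : Int) (cs.length : Int))
      = if fN < cs.length then ((cs.length / fN : Nat) : Int) else 1 := by
  set n := cs.length with hnn
  have hdvd : fN ∣ n := cycP_min_dvd cs fN hf1 hfn hn hf hmin n (cycP_length cs)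
  -- one success/failure step of the loop at part length i (a divisor of n, i < n):
  have hstep : ∀ i : Nat, 1 ≤ i → i ∣ n →
      ((PySem.List.slice ((PySem.List.pyRange 0 (n : Int) (i : Int)).map
          (fun j => PySem.List.slice cs (some j) (some (j + (i : Int))))) (some 1) none
        = PySem.List.slice ((PySem.List.pyRange 0 (n : Int) (i : Int)).map
          (fun j => PySem.List.slice cs (some j) (some (j + (i : Int))))) none (some (-1)))
       ↔ cycP cs i) := by
    intro i h1 h2
    rw [PySem.List.slice_from_one, PySem.List.slice_to_neg_one, parts_eq cs i h1 h2,
      parts_cond_iff cs i h1 h2]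
    exact ⟨cycP_of_shiftP cs i h1 h2, shiftP_of_cycP cs i⟩
  induction hd : fN - i₀ generalizing i₀ with
  | zero =>
    have hieq : i₀ = fN := by omega
    subst hieq
    by_cases hlt : i₀ < n
    · rw [if_pos hlt]
      rw [PySem.List.pyRange_one_cons (by exact_mod_cast hlt)]
      rw [solutionGo]
      rw [if_pos (by rw [PySem.Int.mod_eq_zero_iff_dvd]; exact_mod_cast hdvd)]
      simp only []
      rw [if_pos ((hstep i₀ h1 hdvd).2 hf)]
      rw [parts_eq cs i₀ h1 hdvd]
      simp
      rw [← hnn]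
    · rw [if_neg hlt]
      have hrange : PySem.List.pyRange ((i₀ : Nat) : Int) (n : Int) = [] := by
        rw [PySem.List.pyRange_of_pos _ _ (by omega : (0:Int) < 1)]
        rw [if_neg (by exact_mod_cast hlt)]
        simp
      rw [hrange, solutionGo]
  | succ d ih =>
    have hi₀f : i₀ < fN := by omega
    have hi₀n : i₀ < n := by omega
    rw [PySem.List.pyRange_one_cons (by exact_mod_cast hi₀n)]
    rw [solutionGo]
    have hnotcyc : ¬ cycP cs i₀ := hmin i₀ h1 hi₀f
    have hrec : ((i₀ : Nat) : Int) + 1 = (((i₀ + 1 : Nat)) : Int) := by push_cast; ring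
    by_cases hdv : i₀ ∣ n
    · rw [if_pos (by rw [PySem.Int.mod_eq_zero_iff_dvd]; exact_mod_cast hdv)]
      simp only []
      rw [if_neg (fun hc => hnotcyc ((hstep i₀ h1 hdv).1 hc))]
      rw [hrec]
      exact ih (i₀ + 1) (by omega) (by omega) (by omega)
    · rw [if_neg (by rw [PySem.Int.mod_eq_zero_iff_dvd]; exact_mod_cast hdv)]
      rw [hrec]
      exact ih (i₀ + 1) (by omega) (by omega) (by omega)

-- ===== VERDICT (by name: the statement is the Claim_ definition above) =====
theorem solution_spec : Claim_equal_solution := by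
  intro s _
  unfold Spec_solution solution solution_alt
  simp only [PySem.Chars.len_eq]
  set cs := s.toList with hcs
  set n := cs.length with hn
  by_cases hn0 : n = 0
  · rw [hn0]
    have h0 : PySem.List.pyRange 1 ((0:Nat) : Int) = ([] : List Int) := by decide
    norm_num [h0, solutionGo]
  · have hpos : 0 < n := by omega
    obtain ⟨fN, hFeq, hf1, hfn, hcyc, hmin⟩ := find_facts cs hpos
    rw [if_neg (by exact_mod_cast hn0), hFeq]
    have hloop := loop_eq cs fN hpos hf1 hfn hcyc hmin 1 (le_refl 1) hf1
    have hone : ((1 : Nat) : Int) = (1 : Int) := by norm_num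
    rw [hone] at hloop
    rw [hloop, PySem.Int.floordiv_natCast]
    by_cases hlt : fN < n
    · rw [if_pos hlt]
    · rw [if_neg hlt]
      have : fN = n := by omega
      rw [this, Nat.div_self hpos]
      norm_num
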